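-- pv_equiv track=rewrite | github.com/bwisniewski44/AOC2021 | 03/main.py | calculate_optima
-- ===== SOURCE A (Python) =====
-- def calculate_optima(line_indices_by_glyph, expected_count=None, tie_breaker=None):
--     """
--     TODO EXPLAIN
--
--     :param dict[str,set[int]] line_indices_by_glyph:
--     :param int expected_count:
--     :param str tie_breaker:
--
--     :return: 2-tuple giving...
--       1. (str) least-populous digit among the set
--       2. (str) most-populous digit among the set
--     :rtype: (str, str)
--     """
--
--     digits_and_counts = [(digit, len(indices)) for digit, indices in line_indices_by_glyph.items()]
--     max_digit, max_count = digits_and_counts[0]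
--     min_digit, min_count = digits_and_counts[0]
--
--     i = 1
--     total_count = max_count
--     while i < len(digits_and_counts):
--         next_digit, next_count = digits_and_counts[i]
--         total_count += next_count
--
--         # Update the maximum if necessary
--         if next_count == max_count and tie_breaker in {next_digit, max_digit}:
--             max_digit = tie_breaker
--         elif next_count > max_count:
--             max_digit = next_digit
--             max_count = next_count
--
--         # Update the minimum if necessary
--         if next_count == min_count and tie_breaker in {next_digit, min_digit}:
--             min_digit = tie_breaker
--         elif next_count < min_count:
--             min_digit = next_digit
--             min_count = next_count
--
--         i += 1
--
--     # Ensure that the total digit count across all digits is that which is expected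
--     if expected_count and total_count != expected_count:
--         raise ValueError(f"Expecting a count of {expected_count}, but tallied a total of {total_count}")
--
--     # Ensure that the optima are authoritative (there isn't a tie for 1st or a tie for last)
--     if not tie_breaker:
--         maxima_count = minima_count = 0
--         for _, count in digits_and_counts:
--             if count == max_count:
--                 maxima_count += 1
--             if count == min_count:
--                 minima_count += 1
--         if maxima_count != 1:
--             raise \
--                 ValueError(
--                     f"There are {maxima_count} maxima, each having {max_count} presentations; expecting 1 such maximum"
--                 )
--         elif minima_count != 1:
--             raise \
--                 ValueError(
--                     f"There are {minima_count} minima, each having {min_count} presentations; expecting 1 such minimum"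
--                 )
--
--     return min_digit, max_digit
-- ===== SOURCE B (Python) =====
-- def calculate_optima(line_indices_by_glyph, expected_count=None, tie_breaker=None):
--     """Same result as A, computed by global aggregation instead of an incremental scan:
--     build (digit, count) pairs once, take the global max/min counts, run the two
--     validations, then pick tie_breaker if it holds an extremal count, else the first
--     digit holding it."""
--     pairs = [(digit, len(indices)) for digit, indices in line_indices_by_glyph.items()]
--     counts = [count for _, count in pairs]
--     total = sum(counts)
--     max_count = max(counts)
--     min_count = min(counts)
--
--     if expected_count and total != expected_count:
--         raise ValueError(f"Expecting a count of {expected_count}, but tallied a total of {total}")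
--
--     if not tie_breaker:
--         maxima_count = counts.count(max_count)
--         minima_count = counts.count(min_count)
--         if maxima_count != 1:
--             raise \
--                 ValueError(
--                     f"There are {maxima_count} maxima, each having {max_count} presentations; expecting 1 such maximum"
--                 )
--         elif minima_count != 1:
--             raise \
--                 ValueError(
--                     f"There are {minima_count} minima, each having {min_count} presentations; expecting 1 such minimum"
--                 )
--
--     if any(digit == tie_breaker and count == max_count for digit, count in pairs):
--         max_digit = tie_breaker
--     else:
--         max_digit = next(digit for digit, count in pairs if count == max_count)
--
--     if any(digit == tie_breaker and count == min_count for digit, count in pairs):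
--         min_digit = tie_breaker
--     else:
--         min_digit = next(digit for digit, count in pairs if count == min_count)
--
--     return min_digit, max_digit
-- ===== Notes on version B (the rewrite author's own statement) =====
-- stated objective: alternative
-- what changed: Replaces A's single incremental while-loop that threads running max/min/tie state through every step by a global-aggregation decomposition: build the (digit,count) pairs once, take the global max/min counts, run the two validations on count tallies, then select tie_breaker if it holds an extremal count and otherwise the first digit holding it.
import Mathlib
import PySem

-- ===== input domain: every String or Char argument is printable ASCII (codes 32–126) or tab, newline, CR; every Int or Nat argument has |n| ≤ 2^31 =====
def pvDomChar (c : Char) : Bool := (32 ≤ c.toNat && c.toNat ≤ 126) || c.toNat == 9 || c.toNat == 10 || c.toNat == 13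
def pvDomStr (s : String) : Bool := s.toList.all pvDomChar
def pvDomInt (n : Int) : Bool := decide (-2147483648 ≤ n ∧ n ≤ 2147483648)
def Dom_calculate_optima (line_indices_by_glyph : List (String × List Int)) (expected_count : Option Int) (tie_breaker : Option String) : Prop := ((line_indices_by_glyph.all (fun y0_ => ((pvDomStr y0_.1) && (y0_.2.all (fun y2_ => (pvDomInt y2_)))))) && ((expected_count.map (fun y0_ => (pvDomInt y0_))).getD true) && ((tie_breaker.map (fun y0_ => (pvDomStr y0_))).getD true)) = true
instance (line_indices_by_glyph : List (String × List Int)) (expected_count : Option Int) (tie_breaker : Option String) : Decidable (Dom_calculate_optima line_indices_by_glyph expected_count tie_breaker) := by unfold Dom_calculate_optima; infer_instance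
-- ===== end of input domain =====

-- B replaces A's incremental running-max/min scan by global aggregation (max/min of the counts, then a
-- membership/first-occurrence selection); objective: alternative decomposition, same O(n) cost.


-- ===== PORT A =====
-- One iteration of A's while-loop body for the maximum state (max_digit, max_count); branch order as in Python.
def pvAStepMax (tb : Option String) (s : String × Int) (p : String × Int) : String × Int :=
  if p.2 = s.2 ∧ (tb = some p.1 ∨ tb = some s.1) then (tb.getD s.1, s.2)
  else if p.2 > s.2 then p
  else s

-- One iteration of A's while-loop body for the minimum state (min_digit, min_count).
def pvAStepMin (tb : Option String) (s : String × Int) (p : String × Int) : String × Int :=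
  if p.2 = s.2 ∧ (tb = some p.1 ∨ tb = some s.1) then (tb.getD s.1, s.2)
  else if p.2 < s.2 then p
  else s

-- A's while-loop over digits_and_counts[1:]; state = (max state, min state, total_count).
def pvALoop (tb : Option String) :
    List (String × Int) → (String × Int) → (String × Int) → Int → (String × Int) × (String × Int) × Int
  | [], mx, mn, tot => (mx, mn, tot)
  | p :: rest, mx, mn, tot => pvALoop tb rest (pvAStepMax tb mx p) (pvAStepMin tb mn p) (tot + p.2)

def calculate_optima (line_indices_by_glyph : List (String × List Int)) (expected_count : Option Int) (tie_breaker : Option String) : String × String :=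
  -- len(indices) of a Python set passed as the list of its distinct elements
  let digits_and_counts := line_indices_by_glyph.map (fun p => (p.1, ((PySem.Set.ofList p.2).length : Int)))
  match digits_and_counts with
  | [] => ("", "")  -- digits_and_counts[0] raises IndexError here; excluded by Pre_
  | first :: rest =>
    let r := pvALoop tie_breaker rest first first first.2
    -- the two ValueError raise paths (expected_count mismatch, non-unique optima) are excluded by Pre_
    (r.2.1.1, r.1.1)

-- ===== PORT B =====
def calculate_optima_alt (line_indices_by_glyph : List (String × List Int)) (expected_count : Option Int) (tie_breaker : Option String) : String × String :=
  let pairs := line_indices_by_glyph.map (fun p => (p.1, ((PySem.Set.ofList p.2).length : Int)))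
  let counts := pairs.map Prod.snd
  let _total := counts.sum
  -- max(counts)/min(counts); the ValueError on an empty list is excluded by Pre_
  let max_count := (PySem.List.max? counts (fun x => x)).getD 0
  let min_count := (PySem.List.min? counts (fun x => x)).getD 0
  -- the validation raise paths (expected_count, uniqueness when tie_breaker is falsy) are excluded by Pre_
  let max_digit :=
    if pairs.any (fun p => some p.1 == tie_breaker && p.2 == max_count) then tie_breaker.getD ""
    else ((pairs.find? (fun p => p.2 == max_count)).map Prod.fst).getD ""
  let min_digit :=
    if pairs.any (fun p => some p.1 == tie_breaker && p.2 == min_count) then tie_breaker.getD ""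
    else ((pairs.find? (fun p => p.2 == min_count)).map Prod.fst).getD ""
  (min_digit, max_digit)

-- ===== PRECONDITION & SPEC =====
-- Pre_ = exactly the inputs where A returns normally: a nonempty dict (else IndexError), the expected_count
-- check passes (expected_count falsy or equal to the total), and when tie_breaker is falsy the maximum and
-- minimum counts are each attained exactly once (else ValueError).
def Pre_calculate_optima (line_indices_by_glyph : List (String × List Int)) (expected_count : Option Int) (tie_breaker : Option String) : Prop :=
  let counts := line_indices_by_glyph.map (fun p => ((PySem.Set.ofList p.2).length : Int))
  counts ≠ [] ∧
  (expected_count = none ∨ expected_count = some 0 ∨ expected_count = some counts.sum) ∧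
  ((tie_breaker = none ∨ tie_breaker = some "") →
    counts.count (counts.foldl max (counts.headD 0)) = 1 ∧
    counts.count (counts.foldl min (counts.headD 0)) = 1)
instance (line_indices_by_glyph : List (String × List Int)) (expected_count : Option Int) (tie_breaker : Option String) : Decidable (Pre_calculate_optima line_indices_by_glyph expected_count tie_breaker) := by unfold Pre_calculate_optima; infer_instance

def pvWitness_calculate_optima : (List (String × List Int)) × Option Int × Option String :=
  ([("0", [10]), ("1", [1, 2])], some 3, none)

def Spec_calculate_optima (line_indices_by_glyph : List (String × List Int)) (expected_count : Option Int) (tie_breaker : Option String) (out : String × String) : Prop := out = calculate_optima_alt line_indices_by_glyph expected_count tie_breaker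
instance (line_indices_by_glyph : List (String × List Int)) (expected_count : Option Int) (tie_breaker : Option String) (out : String × String) : Decidable (Spec_calculate_optima line_indices_by_glyph expected_count tie_breaker out) := by unfold Spec_calculate_optima; infer_instance

-- ===== CLAIM (what is proved, stated in full; the proofs are below) =====
def Claim_equal_calculate_optima : Prop := ∀ (line_indices_by_glyph : List (String × List Int)) (expected_count : Option Int) (tie_breaker : Option String), Dom_calculate_optima line_indices_by_glyph expected_count tie_breaker → Pre_calculate_optima line_indices_by_glyph expected_count tie_breaker → Spec_calculate_optima line_indices_by_glyph expected_count tie_breaker (calculate_optima line_indices_by_glyph expected_count tie_breaker)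

-- ===== LEMMAS AND PROOFS =====

-- Closed form of the final max_digit of A's loop started in state (d, c) on the remaining list l.
def pickMax (tb : Option String) (l : List (String × Int)) (d : String) (c : Int) : String :=
  let M := (l.map Prod.snd).foldl max c
  if (tb = some d ∧ c = M) ∨ (∃ p ∈ l, tb = some p.1 ∧ p.2 = M) then tb.getD d
  else if c = M then d
  else ((l.find? (fun p => p.2 == M)).map Prod.fst).getD ""

-- Closed form of the final min_digit of A's loop started in state (d, c) on the remaining list l.
def pickMin (tb : Option String) (l : List (String × Int)) (d : String) (c : Int) : String :=
  let m := (l.map Prod.snd).foldl min c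
  if (tb = some d ∧ c = m) ∨ (∃ p ∈ l, tb = some p.1 ∧ p.2 = m) then tb.getD d
  else if c = m then d
  else ((l.find? (fun p => p.2 == m)).map Prod.fst).getD ""

lemma pickMax_cons (tb : Option String) (t : List (String × Int)) (d nd : String) (c nc : Int) :
    pickMax tb ((nd, nc) :: t) d c
      = (let M := (t.map Prod.snd).foldl max (max c nc);
         if (tb = some d ∧ c = M) ∨ (tb = some nd ∧ nc = M) ∨ (∃ p ∈ t, tb = some p.1 ∧ p.2 = M)
         then tb.getD d
         else if c = M then d
         else if nc = M then nd
         else ((t.find? (fun p => p.2 == M)).map Prod.fst).getD "") := by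
  simp only [pickMax, List.map_cons, List.foldl_cons]
  set M := (t.map Prod.snd).foldl max (max c nc) with hM
  have hsplit : (∃ p ∈ (nd, nc) :: t, tb = some p.1 ∧ p.2 = M)
      ↔ (tb = some nd ∧ nc = M) ∨ (∃ p ∈ t, tb = some p.1 ∧ p.2 = M) := by
    simp
  simp only [hsplit]
  by_cases h1 : (tb = some d ∧ c = M) ∨ (tb = some nd ∧ nc = M) ∨ (∃ p ∈ t, tb = some p.1 ∧ p.2 = M)
  · rw [if_pos (by tauto), if_pos h1]
  · rw [if_neg (by tauto), if_neg h1]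
    by_cases h2 : c = M
    · rw [if_pos h2, if_pos h2]
    · rw [if_neg h2, if_neg h2]
      by_cases h3 : nc = M
      · rw [if_pos h3, List.find?_cons_of_pos (by simpa using h3)]
        simp
      · rw [if_neg h3, List.find?_cons_of_neg (by simpa using h3)]

lemma maxStep_snd (tb : Option String) (d nd : String) (c nc : Int) :
    (pvAStepMax tb (d, c) (nd, nc)).2 = max c nc := by
  unfold pvAStepMax
  split_ifs with h1 h2
  · simp [max_eq_left (le_of_eq h1.1)]
  · simp [max_eq_right (le_of_lt h2)]
  · simp [max_eq_left (le_of_not_gt h2)]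

lemma pickMax_step (tb : Option String) (t : List (String × Int)) (d nd : String) (c nc : Int) :
    pickMax tb ((nd, nc) :: t) d c
      = pickMax tb t (pvAStepMax tb (d, c) (nd, nc)).1 (pvAStepMax tb (d, c) (nd, nc)).2 := by
  rw [pickMax_cons]
  have hub := PySem.List.le_foldl_max (t.map Prod.snd) (max c nc)
  by_cases htie : nc = c ∧ (tb = some nd ∨ tb = some d)
  · obtain ⟨h1, h2⟩ := htie
    subst h1
    obtain ⟨u, hu⟩ : ∃ u, tb = some u := by rcases h2 with h | h <;> exact ⟨_, h⟩
    have hu2 : u = nd ∨ u = d := by rcases h2 with h | h <;> [left; right] <;>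
      (rw [hu] at h; exact Option.some_inj.mp h)
    have hstep : pvAStepMax tb (d, nc) (nd, nc) = (u, nc) := by
      unfold pvAStepMax
      rw [if_pos (⟨rfl, h2⟩ : nc = nc ∧ _), hu]
      rfl
    rw [hstep]
    simp only [pickMax, max_self]
    set M := (t.map Prod.snd).foldl max nc with hM
    by_cases hE : ∃ p ∈ t, tb = some p.1 ∧ p.2 = M
    · rw [if_pos (Or.inr (Or.inr hE)), if_pos (Or.inr hE)]
      simp [hu]
    · by_cases hcM : nc = M
      · have hcondL : (tb = some d ∧ nc = M) ∨ (tb = some nd ∧ nc = M) ∨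
            (∃ p ∈ t, tb = some p.1 ∧ p.2 = M) := by
          rcases hu2 with h | h
          · exact Or.inr (Or.inl ⟨h ▸ hu, hcM⟩)
          · exact Or.inl ⟨h ▸ hu, hcM⟩
        rw [if_pos hcondL, if_pos (Or.inl ⟨hu, hcM⟩)]
        simp [hu]
      · have hL : ¬((tb = some d ∧ nc = M) ∨ (tb = some nd ∧ nc = M) ∨
            (∃ p ∈ t, tb = some p.1 ∧ p.2 = M)) := by
          rintro (⟨_, h⟩ | ⟨_, h⟩ | h)
          · exact hcM h
          · exact hcM h
          · exact hE h
        have hR : ¬((tb = some u ∧ nc = M) ∨ (∃ p ∈ t, tb = some p.1 ∧ p.2 = M)) := by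
          rintro (⟨_, h⟩ | h)
          · exact hcM h
          · exact hE h
        rw [if_neg hL, if_neg hR, if_neg hcM, if_neg hcM, if_neg hcM]
  · by_cases hlt : nc > c
    · have hstep : pvAStepMax tb (d, c) (nd, nc) = (nd, nc) := by
        unfold pvAStepMax
        rw [if_neg htie, if_pos hlt]
      rw [hstep]
      simp only [pickMax]
      rw [max_eq_right (le_of_lt hlt)] at *
      set M := (t.map Prod.snd).foldl max nc with hM
      have hcM : ¬ c = M := by have := hub.1; omega
      by_cases h1 : (tb = some nd ∧ nc = M) ∨ (∃ p ∈ t, tb = some p.1 ∧ p.2 = M)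
      · rw [if_pos (Or.inr h1), if_pos h1]
        obtain ⟨u, hu⟩ : ∃ u, tb = some u := by
          rcases h1 with ⟨h, _⟩ | ⟨p, _, h, _⟩ <;> exact ⟨_, h⟩
        simp [hu]
      · have hL : ¬((tb = some d ∧ c = M) ∨ (tb = some nd ∧ nc = M) ∨
            (∃ p ∈ t, tb = some p.1 ∧ p.2 = M)) := by
          rintro (⟨_, h⟩ | h | h)
          · exact hcM h
          · exact h1 (Or.inl h)
          · exact h1 (Or.inr h)
        rw [if_neg hL, if_neg h1, if_neg hcM]
    · have hle : nc ≤ c := le_of_not_gt hlt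
      have hstep : pvAStepMax tb (d, c) (nd, nc) = (d, c) := by
        unfold pvAStepMax
        rw [if_neg htie, if_neg hlt]
      rw [hstep]
      simp only [pickMax]
      rw [max_eq_left hle] at *
      set M := (t.map Prod.snd).foldl max c with hM
      have hcle : c ≤ M := hub.1
      have hmid : ¬ (tb = some nd ∧ nc = M) := by
        rintro ⟨h4, h5⟩
        exact htie ⟨by omega, Or.inl h4⟩
      by_cases h1 : (tb = some d ∧ c = M) ∨ (∃ p ∈ t, tb = some p.1 ∧ p.2 = M)
      · have hL : (tb = some d ∧ c = M) ∨ (tb = some nd ∧ nc = M) ∨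
            (∃ p ∈ t, tb = some p.1 ∧ p.2 = M) := by
          rcases h1 with h | h
          · exact Or.inl h
          · exact Or.inr (Or.inr h)
        rw [if_pos hL, if_pos h1]
      · have hL : ¬((tb = some d ∧ c = M) ∨ (tb = some nd ∧ nc = M) ∨
            (∃ p ∈ t, tb = some p.1 ∧ p.2 = M)) := by
          rintro (h | h | h)
          · exact h1 (Or.inl h)
          · exact hmid h
          · exact h1 (Or.inr h)
        rw [if_neg hL, if_neg h1]
        by_cases h2 : c = M
        · rw [if_pos h2, if_pos h2]
        · rw [if_neg h2, if_neg h2, if_neg (by omega)]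

lemma pickMin_cons (tb : Option String) (t : List (String × Int)) (d nd : String) (c nc : Int) :
    pickMin tb ((nd, nc) :: t) d c
      = (let M := (t.map Prod.snd).foldl min (min c nc);
         if (tb = some d ∧ c = M) ∨ (tb = some nd ∧ nc = M) ∨ (∃ p ∈ t, tb = some p.1 ∧ p.2 = M)
         then tb.getD d
         else if c = M then d
         else if nc = M then nd
         else ((t.find? (fun p => p.2 == M)).map Prod.fst).getD "") := by
  simp only [pickMin, List.map_cons, List.foldl_cons]
  set M := (t.map Prod.snd).foldl min (min c nc) with hM
  have hsplit : (∃ p ∈ (nd, nc) :: t, tb = some p.1 ∧ p.2 = M)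
      ↔ (tb = some nd ∧ nc = M) ∨ (∃ p ∈ t, tb = some p.1 ∧ p.2 = M) := by
    simp
  simp only [hsplit]
  by_cases h1 : (tb = some d ∧ c = M) ∨ (tb = some nd ∧ nc = M) ∨ (∃ p ∈ t, tb = some p.1 ∧ p.2 = M)
  · rw [if_pos (by tauto), if_pos h1]
  · rw [if_neg (by tauto), if_neg h1]
    by_cases h2 : c = M
    · rw [if_pos h2, if_pos h2]
    · rw [if_neg h2, if_neg h2]
      by_cases h3 : nc = M
      · rw [if_pos h3, List.find?_cons_of_pos (by simpa using h3)]
        simp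
      · rw [if_neg h3, List.find?_cons_of_neg (by simpa using h3)]

lemma minStep_snd (tb : Option String) (d nd : String) (c nc : Int) :
    (pvAStepMin tb (d, c) (nd, nc)).2 = min c nc := by
  unfold pvAStepMin
  split_ifs with h1 h2
  · simp [min_eq_left (le_of_eq h1.1.symm)]
  · simp [min_eq_right (le_of_lt h2)]
  · simp [min_eq_left (le_of_not_gt h2)]

lemma pickMin_step (tb : Option String) (t : List (String × Int)) (d nd : String) (c nc : Int) :
    pickMin tb ((nd, nc) :: t) d c
      = pickMin tb t (pvAStepMin tb (d, c) (nd, nc)).1 (pvAStepMin tb (d, c) (nd, nc)).2 := by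
  rw [pickMin_cons]
  have hub := PySem.List.foldl_min_le (t.map Prod.snd) (min c nc)
  by_cases htie : nc = c ∧ (tb = some nd ∨ tb = some d)
  · obtain ⟨h1, h2⟩ := htie
    subst h1
    obtain ⟨u, hu⟩ : ∃ u, tb = some u := by rcases h2 with h | h <;> exact ⟨_, h⟩
    have hu2 : u = nd ∨ u = d := by rcases h2 with h | h <;> [left; right] <;>
      (rw [hu] at h; exact Option.some_inj.mp h)
    have hstep : pvAStepMin tb (d, nc) (nd, nc) = (u, nc) := by
      unfold pvAStepMin
      rw [if_pos (⟨rfl, h2⟩ : nc = nc ∧ _), hu]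
      rfl
    rw [hstep]
    simp only [pickMin, min_self]
    set M := (t.map Prod.snd).foldl min nc with hM
    by_cases hE : ∃ p ∈ t, tb = some p.1 ∧ p.2 = M
    · rw [if_pos (Or.inr (Or.inr hE)), if_pos (Or.inr hE)]
      simp [hu]
    · by_cases hcM : nc = M
      · have hcondL : (tb = some d ∧ nc = M) ∨ (tb = some nd ∧ nc = M) ∨
            (∃ p ∈ t, tb = some p.1 ∧ p.2 = M) := by
          rcases hu2 with h | h
          · exact Or.inr (Or.inl ⟨h ▸ hu, hcM⟩)
          · exact Or.inl ⟨h ▸ hu, hcM⟩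
        rw [if_pos hcondL, if_pos (Or.inl ⟨hu, hcM⟩)]
        simp [hu]
      · have hL : ¬((tb = some d ∧ nc = M) ∨ (tb = some nd ∧ nc = M) ∨
            (∃ p ∈ t, tb = some p.1 ∧ p.2 = M)) := by
          rintro (⟨_, h⟩ | ⟨_, h⟩ | h)
          · exact hcM h
          · exact hcM h
          · exact hE h
        have hR : ¬((tb = some u ∧ nc = M) ∨ (∃ p ∈ t, tb = some p.1 ∧ p.2 = M)) := by
          rintro (⟨_, h⟩ | h)
          · exact hcM h
          · exact hE h
        rw [if_neg hL, if_neg hR, if_neg hcM, if_neg hcM, if_neg hcM]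
  · by_cases hlt : nc < c
    · have hstep : pvAStepMin tb (d, c) (nd, nc) = (nd, nc) := by
        unfold pvAStepMin
        rw [if_neg htie, if_pos hlt]
      rw [hstep]
      simp only [pickMin]
      rw [min_eq_right (le_of_lt hlt)] at *
      set M := (t.map Prod.snd).foldl min nc with hM
      have hcM : ¬ c = M := by have := hub.1; omega
      by_cases h1 : (tb = some nd ∧ nc = M) ∨ (∃ p ∈ t, tb = some p.1 ∧ p.2 = M)
      · rw [if_pos (Or.inr h1), if_pos h1]
        obtain ⟨u, hu⟩ : ∃ u, tb = some u := by
          rcases h1 with ⟨h, _⟩ | ⟨p, _, h, _⟩ <;> exact ⟨_, h⟩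
        simp [hu]
      · have hL : ¬((tb = some d ∧ c = M) ∨ (tb = some nd ∧ nc = M) ∨
            (∃ p ∈ t, tb = some p.1 ∧ p.2 = M)) := by
          rintro (⟨_, h⟩ | h | h)
          · exact hcM h
          · exact h1 (Or.inl h)
          · exact h1 (Or.inr h)
        rw [if_neg hL, if_neg h1, if_neg hcM]
    · have hle : c ≤ nc := le_of_not_gt hlt
      have hstep : pvAStepMin tb (d, c) (nd, nc) = (d, c) := by
        unfold pvAStepMin
        rw [if_neg htie, if_neg hlt]
      rw [hstep]
      simp only [pickMin]
      rw [min_eq_left hle] at *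
      set M := (t.map Prod.snd).foldl min c with hM
      have hcle : M ≤ c := hub.1
      have hmid : ¬ (tb = some nd ∧ nc = M) := by
        rintro ⟨h4, h5⟩
        exact htie ⟨by omega, Or.inl h4⟩
      by_cases h1 : (tb = some d ∧ c = M) ∨ (∃ p ∈ t, tb = some p.1 ∧ p.2 = M)
      · have hL : (tb = some d ∧ c = M) ∨ (tb = some nd ∧ nc = M) ∨
            (∃ p ∈ t, tb = some p.1 ∧ p.2 = M) := by
          rcases h1 with h | h
          · exact Or.inl h
          · exact Or.inr (Or.inr h)
        rw [if_pos hL, if_pos h1]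
      · have hL : ¬((tb = some d ∧ c = M) ∨ (tb = some nd ∧ nc = M) ∨
            (∃ p ∈ t, tb = some p.1 ∧ p.2 = M)) := by
          rintro (h | h | h)
          · exact h1 (Or.inl h)
          · exact hmid h
          · exact h1 (Or.inr h)
        rw [if_neg hL, if_neg h1]
        by_cases h2 : c = M
        · rw [if_pos h2, if_pos h2]
        · rw [if_neg h2, if_neg h2, if_neg (by omega)]

lemma pickMax_head (tb : Option String) (x1 : String) (k : Int) (rest : List (String × Int)) :
    pickMax tb rest x1 k =
      (let M := (rest.map Prod.snd).foldl max k
       if ((x1, k) :: rest).any (fun p => some p.1 == tb && p.2 == M) then tb.getD ""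
       else ((((x1, k) :: rest).find? (fun p => p.2 == M)).map Prod.fst).getD "") := by
  simp only [pickMax]
  set M := (rest.map Prod.snd).foldl max k with hM
  have hany : (((x1, k) :: rest).any (fun p => some p.1 == tb && p.2 == M) = true)
      ↔ ((tb = some x1 ∧ k = M) ∨ ∃ p ∈ rest, tb = some p.1 ∧ p.2 = M) := by
    simp only [List.any_cons, Bool.or_eq_true, Bool.and_eq_true, beq_iff_eq, List.any_eq_true]
    constructor
    · rintro (⟨h1, h2⟩ | ⟨p, hp, h1, h2⟩)
      · exact Or.inl ⟨h1.symm, h2⟩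
      · exact Or.inr ⟨p, hp, h1.symm, h2⟩
    · rintro (⟨h1, h2⟩ | ⟨p, hp, h1, h2⟩)
      · exact Or.inl ⟨h1.symm, h2⟩
      · exact Or.inr ⟨p, hp, h1.symm, h2⟩
  by_cases hc : (tb = some x1 ∧ k = M) ∨ ∃ p ∈ rest, tb = some p.1 ∧ p.2 = M
  · rw [if_pos hc, if_pos (hany.mpr hc)]
    obtain ⟨u, hu⟩ : ∃ u, tb = some u := by
      rcases hc with ⟨h, _⟩ | ⟨p, _, h, _⟩ <;> exact ⟨_, h⟩
    simp [hu]
  · have hcb : ¬(((x1, k) :: rest).any (fun p => some p.1 == tb && p.2 == M) = true) := by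
      rw [hany]; exact hc
    rw [if_neg hc]
    by_cases hk : k = M
    · rw [if_pos hk, if_neg hcb, List.find?_cons_of_pos (by simpa using hk)]
      simp
    · rw [if_neg hk, if_neg hcb, List.find?_cons_of_neg (by simpa using hk)]

lemma pickMin_head (tb : Option String) (x1 : String) (k : Int) (rest : List (String × Int)) :
    pickMin tb rest x1 k =
      (let M := (rest.map Prod.snd).foldl min k
       if ((x1, k) :: rest).any (fun p => some p.1 == tb && p.2 == M) then tb.getD ""
       else ((((x1, k) :: rest).find? (fun p => p.2 == M)).map Prod.fst).getD "") := by
  simp only [pickMin]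
  set M := (rest.map Prod.snd).foldl min k with hM
  have hany : (((x1, k) :: rest).any (fun p => some p.1 == tb && p.2 == M) = true)
      ↔ ((tb = some x1 ∧ k = M) ∨ ∃ p ∈ rest, tb = some p.1 ∧ p.2 = M) := by
    simp only [List.any_cons, Bool.or_eq_true, Bool.and_eq_true, beq_iff_eq, List.any_eq_true]
    constructor
    · rintro (⟨h1, h2⟩ | ⟨p, hp, h1, h2⟩)
      · exact Or.inl ⟨h1.symm, h2⟩
      · exact Or.inr ⟨p, hp, h1.symm, h2⟩
    · rintro (⟨h1, h2⟩ | ⟨p, hp, h1, h2⟩)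
      · exact Or.inl ⟨h1.symm, h2⟩
      · exact Or.inr ⟨p, hp, h1.symm, h2⟩
  by_cases hc : (tb = some x1 ∧ k = M) ∨ ∃ p ∈ rest, tb = some p.1 ∧ p.2 = M
  · rw [if_pos hc, if_pos (hany.mpr hc)]
    obtain ⟨u, hu⟩ : ∃ u, tb = some u := by
      rcases hc with ⟨h, _⟩ | ⟨p, _, h, _⟩ <;> exact ⟨_, h⟩
    simp [hu]
  · have hcb : ¬(((x1, k) :: rest).any (fun p => some p.1 == tb && p.2 == M) = true) := by
      rw [hany]; exact hc
    rw [if_neg hc]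
    by_cases hk : k = M
    · rw [if_pos hk, if_neg hcb, List.find?_cons_of_pos (by simpa using hk)]
      simp
    · rw [if_neg hk, if_neg hcb, List.find?_cons_of_neg (by simpa using hk)]


lemma foldMax_eq (tb : Option String) (l : List (String × Int)) :
    ∀ s : String × Int, l.foldl (pvAStepMax tb) s = (pickMax tb l s.1 s.2, (l.map Prod.snd).foldl max s.2) := by
  induction l with
  | nil =>
    intro ⟨d, c⟩
    simp only [List.foldl_nil, List.map_nil, pickMax]
    by_cases h : tb = some d
    · simp [h]
    · simp [h]
  | cons p t ih =>
    intro ⟨d, c⟩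
    obtain ⟨nd, nc⟩ := p
    rw [List.foldl_cons, ih, pickMax_step, List.map_cons, List.foldl_cons, maxStep_snd]

lemma foldMin_eq (tb : Option String) (l : List (String × Int)) :
    ∀ s : String × Int, l.foldl (pvAStepMin tb) s = (pickMin tb l s.1 s.2, (l.map Prod.snd).foldl min s.2) := by
  induction l with
  | nil =>
    intro ⟨d, c⟩
    simp only [List.foldl_nil, List.map_nil, pickMin]
    by_cases h : tb = some d
    · simp [h]
    · simp [h]
  | cons p t ih =>
    intro ⟨d, c⟩
    obtain ⟨nd, nc⟩ := p
    rw [List.foldl_cons, ih, pickMin_step, List.map_cons, List.foldl_cons, minStep_snd]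

lemma pvALoop_eq (tb : Option String) (l : List (String × Int)) :
    ∀ mx mn tot, pvALoop tb l mx mn tot =
      (l.foldl (pvAStepMax tb) mx, l.foldl (pvAStepMin tb) mn, tot + (l.map Prod.snd).sum) := by
  induction l with
  | nil => intro mx mn tot; simp [pvALoop]
  | cons p t ih =>
    intro mx mn tot
    simp only [pvALoop, ih, List.foldl_cons, List.map_cons, List.sum_cons]
    rw [add_assoc]

-- ===== VERDICT (by name: the statement is the Claim_ definition above) =====
theorem calculate_optima_spec : Claim_equal_calculate_optima := by
  unfold Claim_equal_calculate_optima
  intro l ec tb _ hpre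
  unfold Spec_calculate_optima
  cases l with
  | nil =>
    exfalso
    revert hpre
    unfold Pre_calculate_optima
    simp
  | cons x xs =>
    unfold calculate_optima calculate_optima_alt
    simp only [List.map_cons]
    rw [pvALoop_eq, foldMax_eq, foldMin_eq]
    simp only [PySem.List.max?_id_cons, PySem.List.min?_id_cons, Option.getD_some]
    rw [pickMax_head, pickMin_head]
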